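-- pv_equiv track=rewrite | github.com/namiyousef/argument-mining | experiments/yousef/python_files/run.py | _get_zero_start_ids
-- ===== SOURCE A (Python) =====
-- def _get_zero_start_ids(iterable, split_by=[0]):
--     """ TODO run unit tests on this """
--
--     split_by = set(split_by)
--     add_item = float(iterable[0]) in split_by
--     zero_start_ids = []
--     for i, item in enumerate(iterable):
--         if (float(item) in split_by) ^ add_item:
--             add_item = not add_item
--             zero_start_ids.append(i)
--     return zero_start_ids
-- ===== SOURCE B (Python) =====
-- def _run_lengths(mems):
--     # run-length encoding via a run-boundary scan
--     runs = []
--     i = 0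
--     while i < len(mems):
--         j = i + 1
--         while j < len(mems) and mems[j] == mems[i]:
--             j += 1
--         runs.append(j - i)
--         i = j
--     return runs
--
--
-- def _get_zero_start_ids(iterable, split_by=[0]):
--     split_by = set(split_by)
--     mems = [float(item) in split_by for item in iterable]
--     runs = _run_lengths(mems)
--     out, idx = [], 0
--     for r in runs[:-1]:
--         idx += r
--         out.append(idx)
--     return out
-- ===== Notes on version B (the rewrite author's own statement) =====
-- stated objective: alternative
-- what changed: Replaces the stateful xor-toggle element scan with two staged passes: a run-boundary scan that run-length encodes the membership booleans, then emitting the cumulative sums of all run lengths but the last as the boundary indices.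
import Mathlib
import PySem

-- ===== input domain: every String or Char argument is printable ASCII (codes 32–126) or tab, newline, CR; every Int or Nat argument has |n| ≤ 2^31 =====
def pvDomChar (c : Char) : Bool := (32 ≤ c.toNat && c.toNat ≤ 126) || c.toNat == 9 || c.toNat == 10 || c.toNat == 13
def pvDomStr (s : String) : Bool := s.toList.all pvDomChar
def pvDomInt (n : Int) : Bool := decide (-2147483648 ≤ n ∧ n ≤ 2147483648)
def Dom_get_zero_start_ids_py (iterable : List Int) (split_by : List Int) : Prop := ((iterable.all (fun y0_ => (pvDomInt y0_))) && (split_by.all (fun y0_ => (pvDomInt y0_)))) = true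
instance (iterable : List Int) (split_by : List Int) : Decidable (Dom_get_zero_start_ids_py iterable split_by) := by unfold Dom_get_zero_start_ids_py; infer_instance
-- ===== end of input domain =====

-- B replaces A's xor-toggle scan with run-length encoding of the membership booleans
-- followed by cumulative sums of all but the last run (objective: alternative).
-- float() is exact on |n| ≤ 2^31.

-- ===== PORT A =====
def get_zero_start_ids_py (iterable : List Int) (split_by : List Int) : List Int :=
  let s := PySem.Set.ofList split_by
  match PySem.List.pyGet? iterable 0 with          -- float(iterable[0]); none = IndexError, excluded by Pre_
  | none => []
  | some first =>
    (((PySem.List.enumerate iterable).foldl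
        (fun (st : Bool × List Int) p =>
          if Bool.xor (PySem.Set.contains s p.2) st.1 then (!st.1, st.2 ++ [p.1]) else st)
        (PySem.Set.contains s first, [])) : Bool × List Int).2

-- ===== PORT B =====
-- _run_lengths: the outer while loop starts one run per iteration, appending its length to
-- runs; the inner while loop scans to the end of the run (= takeWhile on the tail), and the
-- outer loop resumes at the remainder (= dropWhile on the tail); j - i = 1 + takeWhile-length.
def runLengthsToB : List Bool → List Nat → List Nat
  | [], runs => runs
  | b :: bs, runs =>
    runLengthsToB (bs.dropWhile (fun m => m = b)) (runs ++ [1 + (bs.takeWhile (fun m => m = b)).length])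
termination_by l _ => l.length
decreasing_by
  simp only [List.length_cons]
  exact Nat.lt_succ_of_le (List.length_dropWhile_le _ _)

def get_zero_start_ids_py_alt (iterable : List Int) (split_by : List Int) : List Int :=
  let s := PySem.Set.ofList split_by
  let mems := iterable.map (fun item => PySem.Set.contains s item)
  let runs := runLengthsToB mems []
  ((runs.dropLast).foldl
      (fun (st : List Int × Int) (r : Nat) => (st.1 ++ [st.2 + (r : Int)], st.2 + (r : Int)))
      ([], 0)).1

-- ===== PRECONDITION & SPEC =====
-- Pre_ excludes the empty iterable, on which A raises IndexError.
def Pre_get_zero_start_ids_py (iterable : List Int) (split_by : List Int) : Prop := iterable ≠ []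
instance (iterable : List Int) (split_by : List Int) : Decidable (Pre_get_zero_start_ids_py iterable split_by) := by unfold Pre_get_zero_start_ids_py; infer_instance
def pvWitness_get_zero_start_ids_py : List Int × List Int := ([0, 1, 1, 0], [0])

def Spec_get_zero_start_ids_py (iterable : List Int) (split_by : List Int) (out : List Int) : Prop := out = get_zero_start_ids_py_alt iterable split_by
instance (iterable : List Int) (split_by : List Int) (out : List Int) : Decidable (Spec_get_zero_start_ids_py iterable split_by out) := by unfold Spec_get_zero_start_ids_py; infer_instance

-- ===== CLAIM (what is proved, stated in full; the proofs are below) =====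
def Claim_equal_get_zero_start_ids_py : Prop := ∀ (iterable : List Int) (split_by : List Int), Dom_get_zero_start_ids_py iterable split_by → Pre_get_zero_start_ids_py iterable split_by → Spec_get_zero_start_ids_py iterable split_by (get_zero_start_ids_py iterable split_by)

-- ===== LEMMAS AND PROOFS =====

-- the common spec: indices (counting from i) where the membership boolean changes,
-- 'prev' being the membership just before the current position
def chg (prev : Bool) (i : Int) : List Bool → List Int
  | [] => []
  | b :: bs => if b = prev then chg b (i + 1) bs else i :: chg b (i + 1) bs

-- A's fold produces acc ++ chg
theorem foldA_eq_chg (mem : Int → Bool) (l : List Int) :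
    ∀ (i : Int) (prev : Bool) (acc : List Int),
    ((PySem.List.enumerate l i).foldl
        (fun (st : Bool × List Int) p =>
          if Bool.xor (mem p.2) st.1 then (!st.1, st.2 ++ [p.1]) else st)
        (prev, acc)).2 = acc ++ chg prev i (l.map mem) := by
  induction l with
  | nil => intro i prev acc; simp [PySem.List.enumerate_nil, chg]
  | cons x xs ih =>
    intro i prev acc
    rw [PySem.List.enumerate_cons, List.foldl_cons]
    simp only [List.map_cons]
    cases hmx : mem x <;> cases prev <;>
      simp only [Bool.xor_false, Bool.xor_true,
        Bool.not_true, Bool.not_false, reduceIte] <;>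
      rw [ih] <;> simp [chg]

-- non-accumulator form of the run-length encoding, for the proofs
def runLengthsB : List Bool → List Nat
  | [] => []
  | b :: bs =>
    (1 + (bs.takeWhile (fun m => m = b)).length) :: runLengthsB (bs.dropWhile (fun m => m = b))
termination_by l => l.length
decreasing_by
  simp only [List.length_cons]
  exact Nat.lt_succ_of_le (List.length_dropWhile_le _ _)

-- the accumulator pass is runLengthsB appended to the accumulator
theorem runLengthsToB_eq (n : Nat) :
    ∀ (l : List Bool), l.length = n → ∀ (acc : List Nat),
    runLengthsToB l acc = acc ++ runLengthsB l := by
  induction n using Nat.strong_induction_on with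
  | _ n ih =>
    intro l hn acc
    cases l with
    | nil => simp [runLengthsToB, runLengthsB]
    | cons b bs =>
      rw [runLengthsToB, runLengthsB,
          ih (bs.dropWhile (fun m => m = b)).length
            (by simp only [← hn, List.length_cons]
                exact Nat.lt_succ_of_le (List.length_dropWhile_le _ _))
            _ rfl]
      simp

-- the element just after a dropWhile fails the predicate
theorem dropWhile_head_false {α : Type} (p : α → Bool) :
    ∀ (l : List α) (x : α) (xs : List α), l.dropWhile p = x :: xs → p x = false := by
  intro l
  induction l with
  | nil => intro x xs h; simp [List.dropWhile] at h
  | cons a l ih =>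
    intro x xs h
    by_cases hp : p a
    · rw [List.dropWhile_cons_of_pos hp] at h
      exact ih x xs h
    · rw [List.dropWhile_cons_of_neg hp] at h
      cases h
      simpa using hp

-- chg skips a prefix of elements equal to prev, advancing the index
theorem chg_append_eq (prev : Bool) (t : List Bool) (ht : ∀ x ∈ t, x = prev) :
    ∀ (l : List Bool) (i : Int), chg prev i (t ++ l) = chg prev (i + t.length) l := by
  induction t with
  | nil => intro l i; simp
  | cons a t ih =>
    intro l i
    have ha : a = prev := ht a (by simp)
    have ht' : ∀ x ∈ t, x = prev := fun x hx => ht x (by simp [hx])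
    subst ha
    rw [List.cons_append, show chg a i (a :: (t ++ l)) = chg a (i + 1) (t ++ l) by simp [chg],
        ih ht' l (i + 1)]
    congr 1
    simp only [List.length_cons]
    push_cast
    ring

theorem chg_all_eq (prev : Bool) (l : List Bool) (hl : ∀ x ∈ l, x = prev) (i : Int) :
    chg prev i l = [] := by
  have := chg_append_eq prev l hl [] i
  simpa [chg] using this

-- B's prefix-sum pass as a recursive function
def psumsB (idx : Int) : List Nat → List Int
  | [] => []
  | r :: rs => (idx + (r : Int)) :: psumsB (idx + (r : Int)) rs

theorem foldB_eq_psums (rs : List Nat) :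
    ∀ (acc : List Int) (idx : Int),
    ((rs.foldl (fun (st : List Int × Int) (r : Nat) => (st.1 ++ [st.2 + (r : Int)], st.2 + (r : Int)))
        (acc, idx)).1) = acc ++ psumsB idx rs := by
  induction rs with
  | nil => intro acc idx; simp [psumsB]
  | cons r rs ih => intro acc idx; simp [psumsB, ih]

-- main correspondence: the toggle scan over bs (prev = the element before) equals the
-- cumulative sums of all but the last run of prev::bs
theorem chg_eq_psums (n : Nat) :
    ∀ (bs : List Bool), bs.length = n → ∀ (b : Bool) (i : Int),
    chg b (i + 1) bs = psumsB i (runLengthsB (b :: bs)).dropLast := by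
  induction n using Nat.strong_induction_on with
  | _ n ih =>
    intro bs hn b i
    have hsplit : bs = bs.takeWhile (fun m => m = b) ++ bs.dropWhile (fun m => m = b) :=
      (List.takeWhile_append_dropWhile).symm
    set t := bs.takeWhile (fun m => m = b) with htdef
    set rest := bs.dropWhile (fun m => m = b) with hrdef
    have ht : ∀ x ∈ t, x = b := by
      intro x hx
      have := List.mem_takeWhile_imp hx
      simpa using this
    rw [runLengthsB, ← htdef, ← hrdef]
    cases hrest : rest with
    | nil =>
      have hall : ∀ x ∈ bs, x = b := by
        intro x hx
        rw [hsplit, hrest, List.append_nil] at hx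
        exact ht x hx
      simp [runLengthsB, psumsB, chg_all_eq b bs hall]
    | cons b' rest' =>
      have hb' : ¬ (b' = b) := by
        have h := dropWhile_head_false (fun m => decide (m = b)) bs b' rest'
          (by rw [← hrdef, hrest])
        simpa using h
      have hlen : rest'.length < n := by
        have h1 : bs.length = t.length + (b' :: rest').length := by
          conv_lhs => rw [hsplit, hrest]
          simp
        simp only [List.length_cons] at h1
        omega
      have hne : runLengthsB (b' :: rest') ≠ [] := by
        rw [runLengthsB]; simp
      rw [List.dropLast_cons_of_ne_nil hne]
      conv_lhs => rw [hsplit, hrest]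
      rw [chg_append_eq b t ht (b' :: rest') (i + 1)]
      have hstep : chg b ((i + 1) + (t.length : Int)) (b' :: rest')
          = ((i + 1) + (t.length : Int)) :: chg b' ((i + 1) + (t.length : Int) + 1) rest' := by
        simp [chg, hb']
      rw [hstep, psumsB]
      have hX : (i + 1) + (t.length : Int) = i + ((1 + t.length : Nat) : Int) := by
        push_cast; ring
      rw [hX, ih rest'.length hlen rest' rfl b' (i + ((1 + t.length : Nat) : Int))]

-- ===== VERDICT (by name: the statement is the Claim_ definition above) =====
theorem get_zero_start_ids_py_spec : Claim_equal_get_zero_start_ids_py := by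
  intro iterable split_by _ hpre
  unfold Spec_get_zero_start_ids_py
  obtain ⟨x, xs, rfl⟩ := List.exists_cons_of_ne_nil hpre
  have hget : PySem.List.pyGet? (x :: xs) 0 = some x := by
    simp [PySem.List.pyGet?, PySem.List.pyIdx?]
  simp only [get_zero_start_ids_py, get_zero_start_ids_py_alt, hget, List.map_cons]
  set mem : Int → Bool := fun y => PySem.Set.contains (PySem.Set.ofList split_by) y with hmem
  rw [foldA_eq_chg mem (x :: xs) 0 (mem x) [],
      runLengthsToB_eq (mem x :: xs.map mem).length _ rfl [], foldB_eq_psums _ [] 0]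
  simp only [List.nil_append, List.map_cons]
  rw [show chg (mem x) 0 (mem x :: xs.map mem) = chg (mem x) 1 (xs.map mem) by simp [chg]]
  have h2 := chg_eq_psums (xs.map mem).length (xs.map mem) rfl (mem x) 0
  rw [show (0 : Int) + 1 = 1 from by norm_num] at h2
  rw [h2]
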